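-- pv_equiv track=rewrite | github.com/d3zm4n7/Python-Introduction-20.11.2024-K.Melnikov | черновик.py | get_birth_location
-- ===== SOURCE A (Python) =====
-- def get_birth_location(synnitus_number):
--     """Возвращает место рождения по номеру роддома."""
--     location_map = {
--         (1, 10): "Kuressaare Haigla",
--         (11, 19): "Tartu Ülikooli Naistekliinik, Tartumaa, Tartu",
--         (21, 220): "Ida-Tallinna Keskhaigla, Pelgulinna sünnitusmaja, Hiiumaa, Keila, Rapla haigla, Loksa haigla",
--         (221, 270): "Ida-Viru Keskhaigla (Kohtla-Järve, endine Jõhvi)",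
--         (271, 370): "Maarjamõisa Kliinikum (Tartu), Jõgeva Haigla",
--         (371, 420): "Narva Haigla",
--         (421, 470): "Pärnu Haigla",
--         (471, 490): "Pelgulinna Sünnitusmaja (Tallinn), Haapsalu haigla",
--         (491, 520): "Järvamaa Haigla (Paide)",
--         (521, 570): "Rakvere, Tapa haigla",
--         (571, 600): "Valga Haigla",
--         (601, 650): "Viljandi Haigla",
--         (651, 700): "Lõuna-Eesti Haigla (Võru), Põlva Haigla"
--     }
--
--     for (start, end), location in location_map.items():
--         if start <= synnitus_number <= end:
--             return location
--     return "Tundmatu koht"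
-- ===== SOURCE B (Python) =====
-- import bisect
--
-- _STARTS = [1, 11, 21, 221, 271, 371, 421, 471, 491, 521, 571, 601, 651]
-- _ENDS = [10, 19, 220, 270, 370, 420, 470, 490, 520, 570, 600, 650, 700]
-- _LOCS = [
--     "Kuressaare Haigla",
--     "Tartu Ülikooli Naistekliinik, Tartumaa, Tartu",
--     "Ida-Tallinna Keskhaigla, Pelgulinna sünnitusmaja, Hiiumaa, Keila, Rapla haigla, Loksa haigla",
--     "Ida-Viru Keskhaigla (Kohtla-Järve, endine Jõhvi)",
--     "Maarjamõisa Kliinikum (Tartu), Jõgeva Haigla",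
--     "Narva Haigla",
--     "Pärnu Haigla",
--     "Pelgulinna Sünnitusmaja (Tallinn), Haapsalu haigla",
--     "Järvamaa Haigla (Paide)",
--     "Rakvere, Tapa haigla",
--     "Valga Haigla",
--     "Viljandi Haigla",
--     "Lõuna-Eesti Haigla (Võru), Põlva Haigla",
-- ]
--
--
-- def get_birth_location(synnitus_number):
--     """Возвращает место рождения по номеру роддома."""
--     i = bisect.bisect_right(_STARTS, synnitus_number) - 1
--     if i >= 0 and synnitus_number <= _ENDS[i]:
--         return _LOCS[i]
--     return "Tundmatu koht"
-- ===== Notes on version B (the rewrite author's own statement) =====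
-- stated objective: idiomatic
-- what changed: Replaces the linear scan over a dict keyed by (start, end) tuples with module-level parallel sorted tables and a bisect_right binary search over the interval starts, followed by a single end-point check.
import Mathlib
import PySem

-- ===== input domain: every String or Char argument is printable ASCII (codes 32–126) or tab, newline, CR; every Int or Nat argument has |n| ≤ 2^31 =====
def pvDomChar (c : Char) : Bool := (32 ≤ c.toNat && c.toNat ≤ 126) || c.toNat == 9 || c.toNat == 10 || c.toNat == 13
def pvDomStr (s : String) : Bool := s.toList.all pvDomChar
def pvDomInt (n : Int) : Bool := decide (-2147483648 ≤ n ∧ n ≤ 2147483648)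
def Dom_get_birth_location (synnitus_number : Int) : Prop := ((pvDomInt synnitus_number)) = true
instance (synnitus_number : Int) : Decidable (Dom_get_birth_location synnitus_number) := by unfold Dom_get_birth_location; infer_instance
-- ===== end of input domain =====

-- B replaces A's linear scan over a dict of ranges by a bisect_right binary search over a sorted
-- table of interval starts (objective: alternative/idiomatic lookup structure; same exact values).

-- ===== PORT A =====
-- A's dict of ((start, end) : location); keys are distinct, so items() is this list in insertion order.
def pvLocationMap : List ((Int × Int) × String) :=
  [ ((1, 10), "Kuressaare Haigla"),
    ((11, 19), "Tartu Ülikooli Naistekliinik, Tartumaa, Tartu"),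
    ((21, 220), "Ida-Tallinna Keskhaigla, Pelgulinna sünnitusmaja, Hiiumaa, Keila, Rapla haigla, Loksa haigla"),
    ((221, 270), "Ida-Viru Keskhaigla (Kohtla-Järve, endine Jõhvi)"),
    ((271, 370), "Maarjamõisa Kliinikum (Tartu), Jõgeva Haigla"),
    ((371, 420), "Narva Haigla"),
    ((421, 470), "Pärnu Haigla"),
    ((471, 490), "Pelgulinna Sünnitusmaja (Tallinn), Haapsalu haigla"),
    ((491, 520), "Järvamaa Haigla (Paide)"),
    ((521, 570), "Rakvere, Tapa haigla"),
    ((571, 600), "Valga Haigla"),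
    ((601, 650), "Viljandi Haigla"),
    ((651, 700), "Lõuna-Eesti Haigla (Võru), Põlva Haigla") ]

-- the `for … in … items(): if …: return …` loop with its early return
def pvScanA (n : Int) : List ((Int × Int) × String) → String
  | [] => "Tundmatu koht"
  | ((s, e), loc) :: rest => if s ≤ n ∧ n ≤ e then loc else pvScanA n rest

def get_birth_location (synnitus_number : Int) : String :=
  pvScanA synnitus_number pvLocationMap

-- ===== PORT B =====
def pvStarts : List Int := [1, 11, 21, 221, 271, 371, 421, 471, 491, 521, 571, 601, 651]
def pvEnds : List Int := [10, 19, 220, 270, 370, 420, 470, 490, 520, 570, 600, 650, 700]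
def pvLocs : List String :=
  [ "Kuressaare Haigla",
    "Tartu Ülikooli Naistekliinik, Tartumaa, Tartu",
    "Ida-Tallinna Keskhaigla, Pelgulinna sünnitusmaja, Hiiumaa, Keila, Rapla haigla, Loksa haigla",
    "Ida-Viru Keskhaigla (Kohtla-Järve, endine Jõhvi)",
    "Maarjamõisa Kliinikum (Tartu), Jõgeva Haigla",
    "Narva Haigla",
    "Pärnu Haigla",
    "Pelgulinna Sünnitusmaja (Tallinn), Haapsalu haigla",
    "Järvamaa Haigla (Paide)",
    "Rakvere, Tapa haigla",
    "Valga Haigla",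
    "Viljandi Haigla",
    "Lõuna-Eesti Haigla (Võru), Põlva Haigla" ]

-- bisect.bisect_right, lo/hi binary search; fuel (= list length) only makes the recursion structural
def pvBisectGo (a : List Int) (x : Int) : Nat → Nat → Nat → Nat
  | 0, lo, _ => lo
  | fuel + 1, lo, hi =>
      if lo < hi then
        let mid := (lo + hi) / 2
        if x < a.getD mid 0 then pvBisectGo a x fuel lo mid
        else pvBisectGo a x fuel (mid + 1) hi
      else lo

def pvBisectRight (a : List Int) (x : Int) : Nat :=
  pvBisectGo a x a.length 0 a.length

def get_birth_location_alt (synnitus_number : Int) : String :=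
  let i : Int := (pvBisectRight pvStarts synnitus_number : Int) - 1
  if 0 ≤ i ∧ synnitus_number ≤ pvEnds.getD i.toNat 0 then pvLocs.getD i.toNat ""
  else "Tundmatu koht"

-- ===== PRECONDITION & SPEC =====
def Spec_get_birth_location (synnitus_number : Int) (out : String) : Prop := out = get_birth_location_alt synnitus_number
instance (synnitus_number : Int) (out : String) : Decidable (Spec_get_birth_location synnitus_number out) := by unfold Spec_get_birth_location; infer_instance

-- ===== CLAIM (what is proved, stated in full; the proofs are below) =====
def Claim_equal_get_birth_location : Prop := ∀ (synnitus_number : Int), Dom_get_birth_location synnitus_number → Spec_get_birth_location synnitus_number (get_birth_location synnitus_number)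

-- ===== LEMMAS AND PROOFS =====

-- correctness of the lo/hi binary search on a sorted list: the result r splits the
-- indices into a prefix with a[i] ≤ x and a suffix with x < a[i]
theorem pvGo_spec (a : List Int) (x : Int)
    (hsort : a.Pairwise (· ≤ ·)) :
    ∀ fuel lo hi, hi - lo ≤ fuel → lo ≤ hi → hi ≤ a.length →
    (∀ i, i < lo → a.getD i 0 ≤ x) →
    (∀ i, hi ≤ i → i < a.length → x < a.getD i 0) →
    (pvBisectGo a x fuel lo hi ≤ a.length ∧
     (∀ i, i < pvBisectGo a x fuel lo hi → a.getD i 0 ≤ x) ∧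
     (∀ i, pvBisectGo a x fuel lo hi ≤ i → i < a.length → x < a.getD i 0)) := by
  intro fuel
  induction fuel with
  | zero =>
    intro lo hi hf hlh hha hL hU
    have : lo = hi := by omega
    subst this
    rw [pvBisectGo]
    exact ⟨by omega, hL, hU⟩
  | succ fuel ih =>
    intro lo hi hf hlh hha hL hU
    rw [pvBisectGo]
    by_cases hlt : lo < hi
    · simp only [if_pos hlt]
      by_cases hx : x < a.getD ((lo + hi) / 2) 0
      · simp only [if_pos hx]
        refine ih lo ((lo + hi) / 2) (by omega) (by omega) (by omega) hL ?_
        intro i hi1 hi2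
        have hmono : a.getD ((lo + hi) / 2) 0 ≤ a.getD i 0 := by
          rcases eq_or_lt_of_le hi1 with h | h
          · rw [h]
          · rw [List.getD_eq_getElem a 0 (by omega), List.getD_eq_getElem a 0 hi2]
            exact List.pairwise_iff_getElem.mp hsort _ _ (by omega) hi2 h
        omega
      · simp only [if_neg hx]
        refine ih ((lo + hi) / 2 + 1) hi (by omega) (by omega) hha ?_ hU
        intro i hilt
        by_cases hio : i < lo
        · exact hL i hio
        · have h1 : a.getD i 0 ≤ a.getD ((lo + hi) / 2) 0 := by
            rcases eq_or_lt_of_le (show i ≤ (lo + hi) / 2 by omega) with h | h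
            · rw [h]
            · rw [List.getD_eq_getElem a 0 (by omega), List.getD_eq_getElem a 0 (by omega)]
              exact List.pairwise_iff_getElem.mp hsort _ _ (by omega) (by omega) h
          omega
    · simp only [if_neg hlt]
      have : lo = hi := by omega
      subst this
      exact ⟨by omega, hL, hU⟩

-- specialisation to the table of interval starts
theorem pvBisect_starts (n : Int) :
    pvBisectRight pvStarts n ≤ 13 ∧
    (∀ i, i < pvBisectRight pvStarts n → pvStarts.getD i 0 ≤ n) ∧
    (∀ i, pvBisectRight pvStarts n ≤ i → i < 13 → n < pvStarts.getD i 0) := by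
  have h := pvGo_spec pvStarts n (by decide) pvStarts.length 0 pvStarts.length
    (by omega) (by omega) (by omega) (by omega) (by omega)
  rw [show pvStarts.length = 13 from rfl] at h
  exact ⟨h.1, h.2.1, fun i h1 h2 => h.2.2 i h1 (by omega)⟩

-- A's scan evaluated on each interval of the table, and on the misses
theorem pvScan_hit_0 (n : Int) (h1 : (1:Int) ≤ n) (h2 : n ≤ (10:Int)) :
    pvScanA n pvLocationMap = "Kuressaare Haigla" := by
  unfold pvLocationMap
  rw [pvScanA, if_pos ⟨h1, h2⟩]
theorem pvScan_hit_1 (n : Int) (h1 : (11:Int) ≤ n) (h2 : n ≤ (19:Int)) :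
    pvScanA n pvLocationMap = "Tartu Ülikooli Naistekliinik, Tartumaa, Tartu" := by
  unfold pvLocationMap
  rw [pvScanA, if_neg (show ¬((1:Int) ≤ n ∧ n ≤ 10) by omega)]
  rw [pvScanA, if_pos ⟨h1, h2⟩]
theorem pvScan_hit_2 (n : Int) (h1 : (21:Int) ≤ n) (h2 : n ≤ (220:Int)) :
    pvScanA n pvLocationMap = "Ida-Tallinna Keskhaigla, Pelgulinna sünnitusmaja, Hiiumaa, Keila, Rapla haigla, Loksa haigla" := by
  unfold pvLocationMap
  rw [pvScanA, if_neg (show ¬((1:Int) ≤ n ∧ n ≤ 10) by omega)]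
  rw [pvScanA, if_neg (show ¬((11:Int) ≤ n ∧ n ≤ 19) by omega)]
  rw [pvScanA, if_pos ⟨h1, h2⟩]
theorem pvScan_hit_3 (n : Int) (h1 : (221:Int) ≤ n) (h2 : n ≤ (270:Int)) :
    pvScanA n pvLocationMap = "Ida-Viru Keskhaigla (Kohtla-Järve, endine Jõhvi)" := by
  unfold pvLocationMap
  rw [pvScanA, if_neg (show ¬((1:Int) ≤ n ∧ n ≤ 10) by omega)]
  rw [pvScanA, if_neg (show ¬((11:Int) ≤ n ∧ n ≤ 19) by omega)]
  rw [pvScanA, if_neg (show ¬((21:Int) ≤ n ∧ n ≤ 220) by omega)]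
  rw [pvScanA, if_pos ⟨h1, h2⟩]
theorem pvScan_hit_4 (n : Int) (h1 : (271:Int) ≤ n) (h2 : n ≤ (370:Int)) :
    pvScanA n pvLocationMap = "Maarjamõisa Kliinikum (Tartu), Jõgeva Haigla" := by
  unfold pvLocationMap
  rw [pvScanA, if_neg (show ¬((1:Int) ≤ n ∧ n ≤ 10) by omega)]
  rw [pvScanA, if_neg (show ¬((11:Int) ≤ n ∧ n ≤ 19) by omega)]
  rw [pvScanA, if_neg (show ¬((21:Int) ≤ n ∧ n ≤ 220) by omega)]
  rw [pvScanA, if_neg (show ¬((221:Int) ≤ n ∧ n ≤ 270) by omega)]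
  rw [pvScanA, if_pos ⟨h1, h2⟩]
theorem pvScan_hit_5 (n : Int) (h1 : (371:Int) ≤ n) (h2 : n ≤ (420:Int)) :
    pvScanA n pvLocationMap = "Narva Haigla" := by
  unfold pvLocationMap
  rw [pvScanA, if_neg (show ¬((1:Int) ≤ n ∧ n ≤ 10) by omega)]
  rw [pvScanA, if_neg (show ¬((11:Int) ≤ n ∧ n ≤ 19) by omega)]
  rw [pvScanA, if_neg (show ¬((21:Int) ≤ n ∧ n ≤ 220) by omega)]
  rw [pvScanA, if_neg (show ¬((221:Int) ≤ n ∧ n ≤ 270) by omega)]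
  rw [pvScanA, if_neg (show ¬((271:Int) ≤ n ∧ n ≤ 370) by omega)]
  rw [pvScanA, if_pos ⟨h1, h2⟩]
theorem pvScan_hit_6 (n : Int) (h1 : (421:Int) ≤ n) (h2 : n ≤ (470:Int)) :
    pvScanA n pvLocationMap = "Pärnu Haigla" := by
  unfold pvLocationMap
  rw [pvScanA, if_neg (show ¬((1:Int) ≤ n ∧ n ≤ 10) by omega)]
  rw [pvScanA, if_neg (show ¬((11:Int) ≤ n ∧ n ≤ 19) by omega)]
  rw [pvScanA, if_neg (show ¬((21:Int) ≤ n ∧ n ≤ 220) by omega)]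
  rw [pvScanA, if_neg (show ¬((221:Int) ≤ n ∧ n ≤ 270) by omega)]
  rw [pvScanA, if_neg (show ¬((271:Int) ≤ n ∧ n ≤ 370) by omega)]
  rw [pvScanA, if_neg (show ¬((371:Int) ≤ n ∧ n ≤ 420) by omega)]
  rw [pvScanA, if_pos ⟨h1, h2⟩]
theorem pvScan_hit_7 (n : Int) (h1 : (471:Int) ≤ n) (h2 : n ≤ (490:Int)) :
    pvScanA n pvLocationMap = "Pelgulinna Sünnitusmaja (Tallinn), Haapsalu haigla" := by
  unfold pvLocationMap
  rw [pvScanA, if_neg (show ¬((1:Int) ≤ n ∧ n ≤ 10) by omega)]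
  rw [pvScanA, if_neg (show ¬((11:Int) ≤ n ∧ n ≤ 19) by omega)]
  rw [pvScanA, if_neg (show ¬((21:Int) ≤ n ∧ n ≤ 220) by omega)]
  rw [pvScanA, if_neg (show ¬((221:Int) ≤ n ∧ n ≤ 270) by omega)]
  rw [pvScanA, if_neg (show ¬((271:Int) ≤ n ∧ n ≤ 370) by omega)]
  rw [pvScanA, if_neg (show ¬((371:Int) ≤ n ∧ n ≤ 420) by omega)]
  rw [pvScanA, if_neg (show ¬((421:Int) ≤ n ∧ n ≤ 470) by omega)]
  rw [pvScanA, if_pos ⟨h1, h2⟩]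
theorem pvScan_hit_8 (n : Int) (h1 : (491:Int) ≤ n) (h2 : n ≤ (520:Int)) :
    pvScanA n pvLocationMap = "Järvamaa Haigla (Paide)" := by
  unfold pvLocationMap
  rw [pvScanA, if_neg (show ¬((1:Int) ≤ n ∧ n ≤ 10) by omega)]
  rw [pvScanA, if_neg (show ¬((11:Int) ≤ n ∧ n ≤ 19) by omega)]
  rw [pvScanA, if_neg (show ¬((21:Int) ≤ n ∧ n ≤ 220) by omega)]
  rw [pvScanA, if_neg (show ¬((221:Int) ≤ n ∧ n ≤ 270) by omega)]
  rw [pvScanA, if_neg (show ¬((271:Int) ≤ n ∧ n ≤ 370) by omega)]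
  rw [pvScanA, if_neg (show ¬((371:Int) ≤ n ∧ n ≤ 420) by omega)]
  rw [pvScanA, if_neg (show ¬((421:Int) ≤ n ∧ n ≤ 470) by omega)]
  rw [pvScanA, if_neg (show ¬((471:Int) ≤ n ∧ n ≤ 490) by omega)]
  rw [pvScanA, if_pos ⟨h1, h2⟩]
theorem pvScan_hit_9 (n : Int) (h1 : (521:Int) ≤ n) (h2 : n ≤ (570:Int)) :
    pvScanA n pvLocationMap = "Rakvere, Tapa haigla" := by
  unfold pvLocationMap
  rw [pvScanA, if_neg (show ¬((1:Int) ≤ n ∧ n ≤ 10) by omega)]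
  rw [pvScanA, if_neg (show ¬((11:Int) ≤ n ∧ n ≤ 19) by omega)]
  rw [pvScanA, if_neg (show ¬((21:Int) ≤ n ∧ n ≤ 220) by omega)]
  rw [pvScanA, if_neg (show ¬((221:Int) ≤ n ∧ n ≤ 270) by omega)]
  rw [pvScanA, if_neg (show ¬((271:Int) ≤ n ∧ n ≤ 370) by omega)]
  rw [pvScanA, if_neg (show ¬((371:Int) ≤ n ∧ n ≤ 420) by omega)]
  rw [pvScanA, if_neg (show ¬((421:Int) ≤ n ∧ n ≤ 470) by omega)]
  rw [pvScanA, if_neg (show ¬((471:Int) ≤ n ∧ n ≤ 490) by omega)]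
  rw [pvScanA, if_neg (show ¬((491:Int) ≤ n ∧ n ≤ 520) by omega)]
  rw [pvScanA, if_pos ⟨h1, h2⟩]
theorem pvScan_hit_10 (n : Int) (h1 : (571:Int) ≤ n) (h2 : n ≤ (600:Int)) :
    pvScanA n pvLocationMap = "Valga Haigla" := by
  unfold pvLocationMap
  rw [pvScanA, if_neg (show ¬((1:Int) ≤ n ∧ n ≤ 10) by omega)]
  rw [pvScanA, if_neg (show ¬((11:Int) ≤ n ∧ n ≤ 19) by omega)]
  rw [pvScanA, if_neg (show ¬((21:Int) ≤ n ∧ n ≤ 220) by omega)]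
  rw [pvScanA, if_neg (show ¬((221:Int) ≤ n ∧ n ≤ 270) by omega)]
  rw [pvScanA, if_neg (show ¬((271:Int) ≤ n ∧ n ≤ 370) by omega)]
  rw [pvScanA, if_neg (show ¬((371:Int) ≤ n ∧ n ≤ 420) by omega)]
  rw [pvScanA, if_neg (show ¬((421:Int) ≤ n ∧ n ≤ 470) by omega)]
  rw [pvScanA, if_neg (show ¬((471:Int) ≤ n ∧ n ≤ 490) by omega)]
  rw [pvScanA, if_neg (show ¬((491:Int) ≤ n ∧ n ≤ 520) by omega)]
  rw [pvScanA, if_neg (show ¬((521:Int) ≤ n ∧ n ≤ 570) by omega)]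
  rw [pvScanA, if_pos ⟨h1, h2⟩]
theorem pvScan_hit_11 (n : Int) (h1 : (601:Int) ≤ n) (h2 : n ≤ (650:Int)) :
    pvScanA n pvLocationMap = "Viljandi Haigla" := by
  unfold pvLocationMap
  rw [pvScanA, if_neg (show ¬((1:Int) ≤ n ∧ n ≤ 10) by omega)]
  rw [pvScanA, if_neg (show ¬((11:Int) ≤ n ∧ n ≤ 19) by omega)]
  rw [pvScanA, if_neg (show ¬((21:Int) ≤ n ∧ n ≤ 220) by omega)]
  rw [pvScanA, if_neg (show ¬((221:Int) ≤ n ∧ n ≤ 270) by omega)]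
  rw [pvScanA, if_neg (show ¬((271:Int) ≤ n ∧ n ≤ 370) by omega)]
  rw [pvScanA, if_neg (show ¬((371:Int) ≤ n ∧ n ≤ 420) by omega)]
  rw [pvScanA, if_neg (show ¬((421:Int) ≤ n ∧ n ≤ 470) by omega)]
  rw [pvScanA, if_neg (show ¬((471:Int) ≤ n ∧ n ≤ 490) by omega)]
  rw [pvScanA, if_neg (show ¬((491:Int) ≤ n ∧ n ≤ 520) by omega)]
  rw [pvScanA, if_neg (show ¬((521:Int) ≤ n ∧ n ≤ 570) by omega)]
  rw [pvScanA, if_neg (show ¬((571:Int) ≤ n ∧ n ≤ 600) by omega)]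
  rw [pvScanA, if_pos ⟨h1, h2⟩]
theorem pvScan_hit_12 (n : Int) (h1 : (651:Int) ≤ n) (h2 : n ≤ (700:Int)) :
    pvScanA n pvLocationMap = "Lõuna-Eesti Haigla (Võru), Põlva Haigla" := by
  unfold pvLocationMap
  rw [pvScanA, if_neg (show ¬((1:Int) ≤ n ∧ n ≤ 10) by omega)]
  rw [pvScanA, if_neg (show ¬((11:Int) ≤ n ∧ n ≤ 19) by omega)]
  rw [pvScanA, if_neg (show ¬((21:Int) ≤ n ∧ n ≤ 220) by omega)]
  rw [pvScanA, if_neg (show ¬((221:Int) ≤ n ∧ n ≤ 270) by omega)]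
  rw [pvScanA, if_neg (show ¬((271:Int) ≤ n ∧ n ≤ 370) by omega)]
  rw [pvScanA, if_neg (show ¬((371:Int) ≤ n ∧ n ≤ 420) by omega)]
  rw [pvScanA, if_neg (show ¬((421:Int) ≤ n ∧ n ≤ 470) by omega)]
  rw [pvScanA, if_neg (show ¬((471:Int) ≤ n ∧ n ≤ 490) by omega)]
  rw [pvScanA, if_neg (show ¬((491:Int) ≤ n ∧ n ≤ 520) by omega)]
  rw [pvScanA, if_neg (show ¬((521:Int) ≤ n ∧ n ≤ 570) by omega)]
  rw [pvScanA, if_neg (show ¬((571:Int) ≤ n ∧ n ≤ 600) by omega)]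
  rw [pvScanA, if_neg (show ¬((601:Int) ≤ n ∧ n ≤ 650) by omega)]
  rw [pvScanA, if_pos ⟨h1, h2⟩]

theorem pvScan_miss (n : Int) (h : n < 1 ∨ (19 < n ∧ n < 21) ∨ 700 < n) :
    pvScanA n pvLocationMap = "Tundmatu koht" := by
  unfold pvLocationMap
  rw [pvScanA, if_neg (show ¬((1:Int) ≤ n ∧ n ≤ 10) by omega)]
  rw [pvScanA, if_neg (show ¬((11:Int) ≤ n ∧ n ≤ 19) by omega)]
  rw [pvScanA, if_neg (show ¬((21:Int) ≤ n ∧ n ≤ 220) by omega)]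
  rw [pvScanA, if_neg (show ¬((221:Int) ≤ n ∧ n ≤ 270) by omega)]
  rw [pvScanA, if_neg (show ¬((271:Int) ≤ n ∧ n ≤ 370) by omega)]
  rw [pvScanA, if_neg (show ¬((371:Int) ≤ n ∧ n ≤ 420) by omega)]
  rw [pvScanA, if_neg (show ¬((421:Int) ≤ n ∧ n ≤ 470) by omega)]
  rw [pvScanA, if_neg (show ¬((471:Int) ≤ n ∧ n ≤ 490) by omega)]
  rw [pvScanA, if_neg (show ¬((491:Int) ≤ n ∧ n ≤ 520) by omega)]
  rw [pvScanA, if_neg (show ¬((521:Int) ≤ n ∧ n ≤ 570) by omega)]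
  rw [pvScanA, if_neg (show ¬((571:Int) ≤ n ∧ n ≤ 600) by omega)]
  rw [pvScanA, if_neg (show ¬((601:Int) ≤ n ∧ n ≤ 650) by omega)]
  rw [pvScanA, if_neg (show ¬((651:Int) ≤ n ∧ n ≤ 700) by omega)]
  rw [pvScanA]

-- ===== VERDICT (by name: the statement is the Claim_ definition above) =====
theorem get_birth_location_spec : Claim_equal_get_birth_location := by
  intro n _
  unfold Spec_get_birth_location get_birth_location get_birth_location_alt
  obtain ⟨hr, L, U⟩ := pvBisect_starts n
  set r := pvBisectRight pvStarts n with hrdef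
  clear_value r
  clear hrdef
  interval_cases r
  · have hup := U 0 (by omega) (by omega)
    rw [show pvStarts.getD 0 0 = (1:Int) from rfl] at hup
    norm_num [pvEnds, pvLocs, List.getD, show ((0:Int)).toNat = 0 from rfl, show ((1:Int)).toNat = 1 from rfl, show ((2:Int)).toNat = 2 from rfl, show ((3:Int)).toNat = 3 from rfl, show ((4:Int)).toNat = 4 from rfl, show ((5:Int)).toNat = 5 from rfl, show ((6:Int)).toNat = 6 from rfl, show ((7:Int)).toNat = 7 from rfl, show ((8:Int)).toNat = 8 from rfl, show ((9:Int)).toNat = 9 from rfl, show ((10:Int)).toNat = 10 from rfl, show ((11:Int)).toNat = 11 from rfl, show ((12:Int)).toNat = 12 from rfl]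
    rw [pvScan_miss n (by omega)]
  · have hlow := L 0 (by omega)
    rw [show pvStarts.getD 0 0 = (1:Int) from rfl] at hlow
    have hup := U 1 (by omega) (by omega)
    rw [show pvStarts.getD 1 0 = (11:Int) from rfl] at hup
    norm_num [pvEnds, pvLocs, List.getD, show ((0:Int)).toNat = 0 from rfl, show ((1:Int)).toNat = 1 from rfl, show ((2:Int)).toNat = 2 from rfl, show ((3:Int)).toNat = 3 from rfl, show ((4:Int)).toNat = 4 from rfl, show ((5:Int)).toNat = 5 from rfl, show ((6:Int)).toNat = 6 from rfl, show ((7:Int)).toNat = 7 from rfl, show ((8:Int)).toNat = 8 from rfl, show ((9:Int)).toNat = 9 from rfl, show ((10:Int)).toNat = 10 from rfl, show ((11:Int)).toNat = 11 from rfl, show ((12:Int)).toNat = 12 from rfl]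
    by_cases hc : n ≤ (10:Int)
    · rw [pvScan_hit_0 n hlow hc, if_pos hc]
    · exfalso; omega
  · have hlow := L 1 (by omega)
    rw [show pvStarts.getD 1 0 = (11:Int) from rfl] at hlow
    have hup := U 2 (by omega) (by omega)
    rw [show pvStarts.getD 2 0 = (21:Int) from rfl] at hup
    norm_num [pvEnds, pvLocs, List.getD, show ((0:Int)).toNat = 0 from rfl, show ((1:Int)).toNat = 1 from rfl, show ((2:Int)).toNat = 2 from rfl, show ((3:Int)).toNat = 3 from rfl, show ((4:Int)).toNat = 4 from rfl, show ((5:Int)).toNat = 5 from rfl, show ((6:Int)).toNat = 6 from rfl, show ((7:Int)).toNat = 7 from rfl, show ((8:Int)).toNat = 8 from rfl, show ((9:Int)).toNat = 9 from rfl, show ((10:Int)).toNat = 10 from rfl, show ((11:Int)).toNat = 11 from rfl, show ((12:Int)).toNat = 12 from rfl]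
    by_cases hc : n ≤ (19:Int)
    · rw [pvScan_hit_1 n hlow hc, if_pos hc]
    · rw [pvScan_miss n (by omega), if_neg (by omega)]
  · have hlow := L 2 (by omega)
    rw [show pvStarts.getD 2 0 = (21:Int) from rfl] at hlow
    have hup := U 3 (by omega) (by omega)
    rw [show pvStarts.getD 3 0 = (221:Int) from rfl] at hup
    norm_num [pvEnds, pvLocs, List.getD, show ((0:Int)).toNat = 0 from rfl, show ((1:Int)).toNat = 1 from rfl, show ((2:Int)).toNat = 2 from rfl, show ((3:Int)).toNat = 3 from rfl, show ((4:Int)).toNat = 4 from rfl, show ((5:Int)).toNat = 5 from rfl, show ((6:Int)).toNat = 6 from rfl, show ((7:Int)).toNat = 7 from rfl, show ((8:Int)).toNat = 8 from rfl, show ((9:Int)).toNat = 9 from rfl, show ((10:Int)).toNat = 10 from rfl, show ((11:Int)).toNat = 11 from rfl, show ((12:Int)).toNat = 12 from rfl]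
    by_cases hc : n ≤ (220:Int)
    · rw [pvScan_hit_2 n hlow hc, if_pos hc]
    · exfalso; omega
  · have hlow := L 3 (by omega)
    rw [show pvStarts.getD 3 0 = (221:Int) from rfl] at hlow
    have hup := U 4 (by omega) (by omega)
    rw [show pvStarts.getD 4 0 = (271:Int) from rfl] at hup
    norm_num [pvEnds, pvLocs, List.getD, show ((0:Int)).toNat = 0 from rfl, show ((1:Int)).toNat = 1 from rfl, show ((2:Int)).toNat = 2 from rfl, show ((3:Int)).toNat = 3 from rfl, show ((4:Int)).toNat = 4 from rfl, show ((5:Int)).toNat = 5 from rfl, show ((6:Int)).toNat = 6 from rfl, show ((7:Int)).toNat = 7 from rfl, show ((8:Int)).toNat = 8 from rfl, show ((9:Int)).toNat = 9 from rfl, show ((10:Int)).toNat = 10 from rfl, show ((11:Int)).toNat = 11 from rfl, show ((12:Int)).toNat = 12 from rfl]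
    by_cases hc : n ≤ (270:Int)
    · rw [pvScan_hit_3 n hlow hc, if_pos hc]
    · exfalso; omega
  · have hlow := L 4 (by omega)
    rw [show pvStarts.getD 4 0 = (271:Int) from rfl] at hlow
    have hup := U 5 (by omega) (by omega)
    rw [show pvStarts.getD 5 0 = (371:Int) from rfl] at hup
    norm_num [pvEnds, pvLocs, List.getD, show ((0:Int)).toNat = 0 from rfl, show ((1:Int)).toNat = 1 from rfl, show ((2:Int)).toNat = 2 from rfl, show ((3:Int)).toNat = 3 from rfl, show ((4:Int)).toNat = 4 from rfl, show ((5:Int)).toNat = 5 from rfl, show ((6:Int)).toNat = 6 from rfl, show ((7:Int)).toNat = 7 from rfl, show ((8:Int)).toNat = 8 from rfl, show ((9:Int)).toNat = 9 from rfl, show ((10:Int)).toNat = 10 from rfl, show ((11:Int)).toNat = 11 from rfl, show ((12:Int)).toNat = 12 from rfl]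
    by_cases hc : n ≤ (370:Int)
    · rw [pvScan_hit_4 n hlow hc, if_pos hc]
    · exfalso; omega
  · have hlow := L 5 (by omega)
    rw [show pvStarts.getD 5 0 = (371:Int) from rfl] at hlow
    have hup := U 6 (by omega) (by omega)
    rw [show pvStarts.getD 6 0 = (421:Int) from rfl] at hup
    norm_num [pvEnds, pvLocs, List.getD, show ((0:Int)).toNat = 0 from rfl, show ((1:Int)).toNat = 1 from rfl, show ((2:Int)).toNat = 2 from rfl, show ((3:Int)).toNat = 3 from rfl, show ((4:Int)).toNat = 4 from rfl, show ((5:Int)).toNat = 5 from rfl, show ((6:Int)).toNat = 6 from rfl, show ((7:Int)).toNat = 7 from rfl, show ((8:Int)).toNat = 8 from rfl, show ((9:Int)).toNat = 9 from rfl, show ((10:Int)).toNat = 10 from rfl, show ((11:Int)).toNat = 11 from rfl, show ((12:Int)).toNat = 12 from rfl]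
    by_cases hc : n ≤ (420:Int)
    · rw [pvScan_hit_5 n hlow hc, if_pos hc]
    · exfalso; omega
  · have hlow := L 6 (by omega)
    rw [show pvStarts.getD 6 0 = (421:Int) from rfl] at hlow
    have hup := U 7 (by omega) (by omega)
    rw [show pvStarts.getD 7 0 = (471:Int) from rfl] at hup
    norm_num [pvEnds, pvLocs, List.getD, show ((0:Int)).toNat = 0 from rfl, show ((1:Int)).toNat = 1 from rfl, show ((2:Int)).toNat = 2 from rfl, show ((3:Int)).toNat = 3 from rfl, show ((4:Int)).toNat = 4 from rfl, show ((5:Int)).toNat = 5 from rfl, show ((6:Int)).toNat = 6 from rfl, show ((7:Int)).toNat = 7 from rfl, show ((8:Int)).toNat = 8 from rfl, show ((9:Int)).toNat = 9 from rfl, show ((10:Int)).toNat = 10 from rfl, show ((11:Int)).toNat = 11 from rfl, show ((12:Int)).toNat = 12 from rfl]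
    by_cases hc : n ≤ (470:Int)
    · rw [pvScan_hit_6 n hlow hc, if_pos hc]
    · exfalso; omega
  · have hlow := L 7 (by omega)
    rw [show pvStarts.getD 7 0 = (471:Int) from rfl] at hlow
    have hup := U 8 (by omega) (by omega)
    rw [show pvStarts.getD 8 0 = (491:Int) from rfl] at hup
    norm_num [pvEnds, pvLocs, List.getD, show ((0:Int)).toNat = 0 from rfl, show ((1:Int)).toNat = 1 from rfl, show ((2:Int)).toNat = 2 from rfl, show ((3:Int)).toNat = 3 from rfl, show ((4:Int)).toNat = 4 from rfl, show ((5:Int)).toNat = 5 from rfl, show ((6:Int)).toNat = 6 from rfl, show ((7:Int)).toNat = 7 from rfl, show ((8:Int)).toNat = 8 from rfl, show ((9:Int)).toNat = 9 from rfl, show ((10:Int)).toNat = 10 from rfl, show ((11:Int)).toNat = 11 from rfl, show ((12:Int)).toNat = 12 from rfl]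
    by_cases hc : n ≤ (490:Int)
    · rw [pvScan_hit_7 n hlow hc, if_pos hc]
    · exfalso; omega
  · have hlow := L 8 (by omega)
    rw [show pvStarts.getD 8 0 = (491:Int) from rfl] at hlow
    have hup := U 9 (by omega) (by omega)
    rw [show pvStarts.getD 9 0 = (521:Int) from rfl] at hup
    norm_num [pvEnds, pvLocs, List.getD, show ((0:Int)).toNat = 0 from rfl, show ((1:Int)).toNat = 1 from rfl, show ((2:Int)).toNat = 2 from rfl, show ((3:Int)).toNat = 3 from rfl, show ((4:Int)).toNat = 4 from rfl, show ((5:Int)).toNat = 5 from rfl, show ((6:Int)).toNat = 6 from rfl, show ((7:Int)).toNat = 7 from rfl, show ((8:Int)).toNat = 8 from rfl, show ((9:Int)).toNat = 9 from rfl, show ((10:Int)).toNat = 10 from rfl, show ((11:Int)).toNat = 11 from rfl, show ((12:Int)).toNat = 12 from rfl]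
    by_cases hc : n ≤ (520:Int)
    · rw [pvScan_hit_8 n hlow hc, if_pos hc]
    · exfalso; omega
  · have hlow := L 9 (by omega)
    rw [show pvStarts.getD 9 0 = (521:Int) from rfl] at hlow
    have hup := U 10 (by omega) (by omega)
    rw [show pvStarts.getD 10 0 = (571:Int) from rfl] at hup
    norm_num [pvEnds, pvLocs, List.getD, show ((0:Int)).toNat = 0 from rfl, show ((1:Int)).toNat = 1 from rfl, show ((2:Int)).toNat = 2 from rfl, show ((3:Int)).toNat = 3 from rfl, show ((4:Int)).toNat = 4 from rfl, show ((5:Int)).toNat = 5 from rfl, show ((6:Int)).toNat = 6 from rfl, show ((7:Int)).toNat = 7 from rfl, show ((8:Int)).toNat = 8 from rfl, show ((9:Int)).toNat = 9 from rfl, show ((10:Int)).toNat = 10 from rfl, show ((11:Int)).toNat = 11 from rfl, show ((12:Int)).toNat = 12 from rfl]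
    by_cases hc : n ≤ (570:Int)
    · rw [pvScan_hit_9 n hlow hc, if_pos hc]
    · exfalso; omega
  · have hlow := L 10 (by omega)
    rw [show pvStarts.getD 10 0 = (571:Int) from rfl] at hlow
    have hup := U 11 (by omega) (by omega)
    rw [show pvStarts.getD 11 0 = (601:Int) from rfl] at hup
    norm_num [pvEnds, pvLocs, List.getD, show ((0:Int)).toNat = 0 from rfl, show ((1:Int)).toNat = 1 from rfl, show ((2:Int)).toNat = 2 from rfl, show ((3:Int)).toNat = 3 from rfl, show ((4:Int)).toNat = 4 from rfl, show ((5:Int)).toNat = 5 from rfl, show ((6:Int)).toNat = 6 from rfl, show ((7:Int)).toNat = 7 from rfl, show ((8:Int)).toNat = 8 from rfl, show ((9:Int)).toNat = 9 from rfl, show ((10:Int)).toNat = 10 from rfl, show ((11:Int)).toNat = 11 from rfl, show ((12:Int)).toNat = 12 from rfl]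
    by_cases hc : n ≤ (600:Int)
    · rw [pvScan_hit_10 n hlow hc, if_pos hc]
    · exfalso; omega
  · have hlow := L 11 (by omega)
    rw [show pvStarts.getD 11 0 = (601:Int) from rfl] at hlow
    have hup := U 12 (by omega) (by omega)
    rw [show pvStarts.getD 12 0 = (651:Int) from rfl] at hup
    norm_num [pvEnds, pvLocs, List.getD, show ((0:Int)).toNat = 0 from rfl, show ((1:Int)).toNat = 1 from rfl, show ((2:Int)).toNat = 2 from rfl, show ((3:Int)).toNat = 3 from rfl, show ((4:Int)).toNat = 4 from rfl, show ((5:Int)).toNat = 5 from rfl, show ((6:Int)).toNat = 6 from rfl, show ((7:Int)).toNat = 7 from rfl, show ((8:Int)).toNat = 8 from rfl, show ((9:Int)).toNat = 9 from rfl, show ((10:Int)).toNat = 10 from rfl, show ((11:Int)).toNat = 11 from rfl, show ((12:Int)).toNat = 12 from rfl]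
    by_cases hc : n ≤ (650:Int)
    · rw [pvScan_hit_11 n hlow hc, if_pos hc]
    · exfalso; omega
  · have hlow := L 12 (by omega)
    rw [show pvStarts.getD 12 0 = (651:Int) from rfl] at hlow
    norm_num [pvEnds, pvLocs, List.getD, show ((0:Int)).toNat = 0 from rfl, show ((1:Int)).toNat = 1 from rfl, show ((2:Int)).toNat = 2 from rfl, show ((3:Int)).toNat = 3 from rfl, show ((4:Int)).toNat = 4 from rfl, show ((5:Int)).toNat = 5 from rfl, show ((6:Int)).toNat = 6 from rfl, show ((7:Int)).toNat = 7 from rfl, show ((8:Int)).toNat = 8 from rfl, show ((9:Int)).toNat = 9 from rfl, show ((10:Int)).toNat = 10 from rfl, show ((11:Int)).toNat = 11 from rfl, show ((12:Int)).toNat = 12 from rfl]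
    by_cases hc : n ≤ (700:Int)
    · rw [pvScan_hit_12 n hlow hc, if_pos hc]
    · rw [pvScan_miss n (by omega), if_neg (by omega)]
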